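-- pv_equiv track=rewrite | github.com/miliar/Code_Jam_Webscraper | solutions_python/solutions_year14_round0_nr4/835.py | strategy_war
-- ===== SOURCE A (Python) =====
-- def strategy_war(b1, b2):
--     count = 0
--     while(len(b1)):
--         if b1.pop() > b2[-1]:
--             count+=1
--             b2.pop(0)
--         else:
--             b2.pop()
--     return count
-- ===== SOURCE B (Python) =====
-- def strategy_war(b1, b2):
--     # One pass with a back-pointer into b2: A's front pops never change b2[-1],
--     # so only the back index matters.  (Unlike A, this does not mutate b1/b2.)
--     count = 0
--     j = len(b2) - 1
--     for card in reversed(b1):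
--         if card > b2[j]:
--             count += 1
--         else:
--             j -= 1
--     return count
-- ===== Notes on version B (the rewrite author's own statement) =====
-- stated objective: faster
-- what changed: Replaces A's repeated list mutation (pop() and O(n) pop(0) each round) with a single non-mutating pass over reversed(b1) that keeps one back-index into b2, since front pops never affect the element A compares against.
import Mathlib
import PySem

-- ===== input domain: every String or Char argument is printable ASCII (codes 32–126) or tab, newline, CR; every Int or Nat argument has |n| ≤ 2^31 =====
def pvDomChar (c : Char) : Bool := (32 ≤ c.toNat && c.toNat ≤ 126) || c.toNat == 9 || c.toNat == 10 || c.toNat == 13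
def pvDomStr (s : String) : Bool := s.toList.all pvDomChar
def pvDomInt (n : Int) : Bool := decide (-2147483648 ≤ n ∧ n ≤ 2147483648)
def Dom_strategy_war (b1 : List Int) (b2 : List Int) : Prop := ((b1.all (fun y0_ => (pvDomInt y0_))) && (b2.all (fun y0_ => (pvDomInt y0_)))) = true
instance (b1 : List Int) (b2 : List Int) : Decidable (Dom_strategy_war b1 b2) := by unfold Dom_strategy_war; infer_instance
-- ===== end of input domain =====

-- B replaces A's repeated pops (including O(n) pop(0)) with one pass over reversed(b1)
-- and a single back-index into b2; A mutates b1 and b2 in place, B does not — the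
-- equivalence proved here is about the return value only.


-- ===== PORT A =====
-- while(len(b1)): if b1.pop() > b2[-1]: count+=1; b2.pop(0) else: b2.pop()
-- pop? b1 (-1) = none exactly when len(b1) == 0 (the loop exit); pyGet? b2 (-1) = none is
-- Python's IndexError (outside Pre_); the inner pop? none branches are unreachable there.
def warA_loop (b1 b2 : List Int) (count : Int) : Int :=
  match h1 : PySem.List.pop? b1 (-1) with
  | none => count
  | some (x, b1') =>
    match PySem.List.pyGet? b2 (-1) with
    | none => count
    | some y =>
      if x > y then
        match PySem.List.pop? b2 0 with
        | none => count + 1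
        | some (_, b2') => warA_loop b1' b2' (count + 1)
      else
        match PySem.List.pop? b2 (-1) with
        | none => count
        | some (_, b2') => warA_loop b1' b2' count
  termination_by b1.length
  decreasing_by
    all_goals
      have := PySem.List.length_of_pop?_eq_some _ h1
      simp only at this
      omega

def strategy_war (b1 : List Int) (b2 : List Int) : Int :=
  warA_loop b1 b2 0

-- ===== PORT B =====
-- count = 0; j = len(b2)-1; for card in reversed(b1): if card > b2[j]: count+=1 else: j-=1
def warB_loop (b2 cards : List Int) (count j : Int) : Int :=
  match cards with
  | [] => count
  | card :: rest =>
    match PySem.List.pyGet? b2 j with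
    | none => count          -- IndexError (outside Pre_)
    | some y =>
      if card > y then warB_loop b2 rest (count + 1) j
      else warB_loop b2 rest count (j - 1)

def strategy_war_alt (b1 : List Int) (b2 : List Int) : Int :=
  warB_loop b2 b1.reverse 0 ((b2.length : Int) - 1)

-- ===== PRECONDITION & SPEC =====
-- A raises IndexError (b2[-1] on an empty b2) iff len(b1) > len(b2); Pre_ excludes exactly those inputs.
def Pre_strategy_war (b1 : List Int) (b2 : List Int) : Prop := b1.length ≤ b2.length
instance (b1 : List Int) (b2 : List Int) : Decidable (Pre_strategy_war b1 b2) := by unfold Pre_strategy_war; infer_instance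
def pvWitness_strategy_war : List Int × List Int := ([3, 1, 4], [2, 5, 0, 7])

def Spec_strategy_war (b1 : List Int) (b2 : List Int) (out : Int) : Prop := out = strategy_war_alt b1 b2
instance (b1 : List Int) (b2 : List Int) (out : Int) : Decidable (Spec_strategy_war b1 b2 out) := by unfold Spec_strategy_war; infer_instance

-- ===== CLAIM (what is proved, stated in full; the proofs are below) =====
def Claim_equal_strategy_war : Prop := ∀ (b1 : List Int) (b2 : List Int), Dom_strategy_war b1 b2 → Pre_strategy_war b1 b2 → Spec_strategy_war b1 b2 (strategy_war b1 b2)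

-- ===== LEMMAS AND PROOFS =====
-- Invariant: A's current pile is the segment seg of the original b2, sitting between
-- pre and post, and B's back index j points at seg's last element: j = |pre| + |seg| - 1.
lemma warA_eq_warB (b1 : List Int) : ∀ (pre seg post : List Int) (count : Int),
    b1.length ≤ seg.length →
    warA_loop b1 seg count
      = warB_loop (pre ++ seg ++ post) b1.reverse count
          ((pre.length : Int) + (seg.length : Int) - 1) := by
  induction b1 using List.reverseRecOn with
  | nil =>
    intro pre seg post count _
    rw [warA_loop, List.reverse_nil, warB_loop]
    simp [PySem.List.pop?, PySem.List.pyIdx?]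
  | append_singleton ys x ih =>
    intro pre seg post count hlen
    simp only [List.length_append, List.length_cons, List.length_nil] at hlen
    -- seg is nonempty; split off its last element
    obtain ⟨L, seg', hseg⟩ : ∃ L seg', seg = seg' ++ [L] := by
      rcases List.eq_nil_or_concat seg with h | ⟨s', L, h⟩
      · subst h; simp at hlen
      · exact ⟨L, s', by simpa [List.concat_eq_append] using h⟩
    subst hseg
    rw [warA_loop]
    rw [PySem.List.pop?_last ys x]
    rw [PySem.List.pyGet?_neg_one_append_singleton seg' L]
    rw [List.reverse_append, List.reverse_singleton, List.singleton_append, warB_loop]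
    have hidx : PySem.List.pyGet? (pre ++ (seg' ++ [L]) ++ post)
        ((pre.length : Int) + ((seg' ++ [L]).length : Int) - 1) = some L := by
      have h1 : pre ++ (seg' ++ [L]) ++ post = (pre ++ seg') ++ L :: post := by simp
      have h2 : ((pre.length : Int) + ((seg' ++ [L]).length : Int) - 1)
          = (((pre ++ seg').length : Nat) : Int) := by
        simp [List.length_append]; ring
      rw [h1, h2]
      exact PySem.List.pyGet?_append_length (pre ++ seg') post L
    rw [hidx]
    by_cases hc : x > L
    · simp only [if_pos hc]
      cases seg' with
      | nil =>
        -- only reachable with ys = []: A pops the lone card, both sides give count+1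
        have hys : ys = [] := by
          cases ys with
          | nil => rfl
          | cons a as => simp at hlen
        subst hys
        rw [show ([] : List Int) ++ [L] = [L] from rfl,
            PySem.List.pop?_zero_cons L ([] : List Int)]
        change warA_loop [] [] (count + 1) = _
        rw [warA_loop, List.reverse_nil, warB_loop]
        simp [PySem.List.pop?, PySem.List.pyIdx?]
      | cons z zs =>
        simp only [List.cons_append]
        rw [PySem.List.pop?_zero_cons z (zs ++ [L])]
        change warA_loop ys (zs ++ [L]) (count + 1) = _
        rw [ih (pre ++ [z]) (zs ++ [L]) post (count + 1) (by simp at hlen ⊢; omega)]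
        congr 1
        · simp
        · simp [List.length_append]; ring
    · simp only [if_neg hc]
      rw [PySem.List.pop?_last seg' L]
      change warA_loop ys seg' count = _
      rw [ih pre seg' (L :: post) count (by simp at hlen ⊢; omega)]
      congr 1
      · simp
      · simp [List.length_append]; ring

-- ===== VERDICT (by name: the statement is the Claim_ definition above) =====
theorem strategy_war_spec : Claim_equal_strategy_war := by
  intro b1 b2 _ hpre
  unfold Spec_strategy_war strategy_war strategy_war_alt
  have := warA_eq_warB b1 [] b2 [] 0 hpre
  simpa using this
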